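-- pv_equiv track=rewrite | github.com/erupikus/asn1PERser | asn1PERser/codec/per/encoder.py | get_range_octet_len
-- ===== SOURCE A (Python) =====
-- def get_range_octet_len(range):
--     base_power = 8
--     power_multiplier = 3
--     while True:
--         if range < 2 ** ((power_multiplier * base_power)):
--             return power_multiplier
--         else:
--             power_multiplier += 1
-- ===== SOURCE B (Python) =====
-- def get_range_octet_len(range):
--     return max(3, (range.bit_length() + 7) // 8)
-- ===== Notes on version B (the rewrite author's own statement) =====
-- stated objective: simpler
-- what changed: Replaces the unbounded growing-power loop with a closed form: the octet floor or the bit length rounded up to whole octets, whichever is larger.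
-- outside the precondition, e.g. on get_range_octet_len(-16777216): A returns 3, B returns 4
import Mathlib
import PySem

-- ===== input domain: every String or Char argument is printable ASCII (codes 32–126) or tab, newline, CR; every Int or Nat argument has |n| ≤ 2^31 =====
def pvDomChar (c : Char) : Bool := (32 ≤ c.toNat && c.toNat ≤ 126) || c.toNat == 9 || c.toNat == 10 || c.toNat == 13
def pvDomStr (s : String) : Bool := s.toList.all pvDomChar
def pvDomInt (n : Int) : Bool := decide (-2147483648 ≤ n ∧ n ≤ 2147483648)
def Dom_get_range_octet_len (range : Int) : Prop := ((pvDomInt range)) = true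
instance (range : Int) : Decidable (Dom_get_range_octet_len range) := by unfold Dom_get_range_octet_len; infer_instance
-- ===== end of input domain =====

-- B replaces A's unbounded growing-power loop with the closed form max(3, ceil(bit_length/8)) (objective: simpler).


-- ===== PORT A =====
-- A's 'while True' loop: increment power_multiplier until range < 2 ** (power_multiplier * 8)
def pvLoopA (range : Int) (pm : Nat) : Int :=
  if range < 2 ^ (pm * 8) then (pm : Int) else pvLoopA range (pm + 1)
termination_by range.toNat + 1 - 2 ^ (pm * 8)
decreasing_by
  rename_i h
  have h1 : (2:Int) ^ (pm * 8) ≤ range := le_of_not_gt h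
  have h2 : ((2 ^ (pm * 8) : Nat) : Int) ≤ range := by exact_mod_cast h1
  have h3 : 2 ^ (pm * 8) < 2 ^ ((pm + 1) * 8) :=
    Nat.pow_lt_pow_right (by omega) (by omega)
  omega

def get_range_octet_len (range : Int) : Int := pvLoopA range 3

-- ===== PORT B =====
def get_range_octet_len_alt (range : Int) : Int :=
  max 3 (PySem.Int.floordiv ((PySem.Int.bitLength range : Int) + 7) 8)

-- ===== PRECONDITION & SPEC =====
-- Pre_ excludes very negative ranges (below minus two to the 24th): a range value is
-- never negative, and on that unspecified corner A's loop answer (any negative fits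
-- the first power) and B's magnitude-based bit-length answer are both accidental.
def Pre_get_range_octet_len (range : Int) : Prop := -16777216 < range
instance (range : Int) : Decidable (Pre_get_range_octet_len range) := by unfold Pre_get_range_octet_len; infer_instance
def pvWitness_get_range_octet_len : Int := (300)

def Spec_get_range_octet_len (range : Int) (out : Int) : Prop := out = get_range_octet_len_alt range
instance (range : Int) (out : Int) : Decidable (Spec_get_range_octet_len range out) := by unfold Spec_get_range_octet_len; infer_instance

-- ===== CLAIM (what is proved, stated in full; the proofs are below) =====
def Claim_equal_get_range_octet_len : Prop := ∀ (range : Int), Dom_get_range_octet_len range → Pre_get_range_octet_len range → Spec_get_range_octet_len range (get_range_octet_len range)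

-- ===== LEMMAS AND PROOFS =====
lemma pvBitLength_le_of_lt {range : Int} {k : Nat}
    (h : range.natAbs < 2 ^ k) : PySem.Int.bitLength range ≤ k := by
  by_contra hgt
  push Not at hgt
  have hne : range ≠ 0 := by
    intro h0'
    subst h0'
    simp [PySem.Int.bitLength_zero] at hgt
  have hle : 2 ^ (PySem.Int.bitLength range - 1) ≤ range.natAbs :=
    PySem.Int.two_pow_bitLength_le range hne
  have hk : 2 ^ k ≤ 2 ^ (PySem.Int.bitLength range - 1) :=
    Nat.pow_le_pow_right (by omega) (by omega)
  omega

lemma pvLt_bitLength_of_le {range : Int} (h0 : 0 ≤ range) {k : Nat}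
    (h : (2:Int) ^ k ≤ range) : k < PySem.Int.bitLength range := by
  have hlt : range.natAbs < 2 ^ PySem.Int.bitLength range :=
    PySem.Int.lt_two_pow_bitLength range
  have h2 : 2 ^ k ≤ range.natAbs := by
    have h' : ((2 ^ k : Nat) : Int) ≤ range := by exact_mod_cast h
    omega
  have : 2 ^ k < 2 ^ PySem.Int.bitLength range := Nat.lt_of_le_of_lt h2 hlt
  exact (Nat.pow_lt_pow_iff_right (by omega)).mp this

lemma pvLoopA_eq (range : Int) (h0 : 0 ≤ range) (pm : Nat) :
    pvLoopA range pm = max (pm : Int) (((PySem.Int.bitLength range + 7) / 8 : Nat) : Int) := by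
  fun_induction pvLoopA range pm with
  | case1 pm h =>
    have hna : range.natAbs < 2 ^ (pm * 8) := by
      have h' : range < ((2 ^ (pm * 8) : Nat) : Int) := by exact_mod_cast h
      omega
    have hb : PySem.Int.bitLength range ≤ pm * 8 := pvBitLength_le_of_lt hna
    have : (PySem.Int.bitLength range + 7) / 8 ≤ pm := by omega
    have : (((PySem.Int.bitLength range + 7) / 8 : Nat) : Int) ≤ (pm : Int) := by
      exact_mod_cast this
    omega
  | case2 pm h ih =>
    have h1 : (2:Int) ^ (pm * 8) ≤ range := le_of_not_gt h
    have hb : pm * 8 < PySem.Int.bitLength range := pvLt_bitLength_of_le h0 h1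
    have hc : pm + 1 ≤ (PySem.Int.bitLength range + 7) / 8 := by omega
    have hc' : ((pm : Int) + 1) ≤ (((PySem.Int.bitLength range + 7) / 8 : Nat) : Int) := by
      exact_mod_cast hc
    rw [ih]
    omega

-- ===== VERDICT (by name: the statement is the Claim_ definition above) =====
theorem get_range_octet_len_spec : Claim_equal_get_range_octet_len := by
  intro range _ hpre
  unfold Spec_get_range_octet_len get_range_octet_len get_range_octet_len_alt
  have h8 : PySem.Int.floordiv ((PySem.Int.bitLength range : Int) + 7) 8
      = (((PySem.Int.bitLength range + 7) / 8 : Nat) : Int) := by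
    have := PySem.Int.floordiv_natCast (PySem.Int.bitLength range + 7) 8
    push_cast at this ⊢
    exact this
  by_cases h0 : 0 ≤ range
  · rw [pvLoopA_eq range h0 3, h8]
    norm_num
  · -- small negative range: A's loop exits at once with the floor value; B's
    -- bit length is at most 24 so the formula also gives the floor value.
    push Not at h0
    have hA : pvLoopA range 3 = 3 := by
      unfold pvLoopA
      rw [if_pos (show range < 2 ^ (3 * 8) by
        have hpow : (0:Int) < 2 ^ (3 * 8) := by positivity
        omega)]
      norm_num
    have hna : range.natAbs < 2 ^ 24 := by
      unfold Pre_get_range_octet_len at hpre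
      omega
    have hb : PySem.Int.bitLength range ≤ 24 := pvBitLength_le_of_lt hna
    have hle : (PySem.Int.bitLength range + 7) / 8 ≤ 3 := by omega
    have hle' : (((PySem.Int.bitLength range + 7) / 8 : Nat) : Int) ≤ 3 := by exact_mod_cast hle
    rw [hA, h8]
    omega
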